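-- pv_equiv track=rewrite | github.com/xinleima/DataAnalysis | analysis_process/parse_code.py | get_suffix_and_preffix
-- ===== SOURCE A (Python) =====
-- def get_suffix_and_preffix(string):
--     if not string:
--         return string
--
--     children = string.split('.')
--     children_len = len(children)
--
--     results = []
--     for i in range(1, children_len):
--         results.append('.'.join(children[0: i]))
--         results.append('.'.join(children[i: children_len]))
--
--     return results
-- ===== SOURCE B (Python) =====
-- def get_suffix_and_preffix(string):
--     if not string:
--         return string
--     results = []
--     for p, ch in enumerate(string):
--         if ch == '.':
--             results.append(string[:p])
--             results.append(string[p + 1:])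
--     return results
-- ===== Notes on version B (the rewrite author's own statement) =====
-- stated objective: simpler
-- what changed: B drops the split-into-tokens/'.'.join reconstruction entirely: a single enumerate pass over the original string appends string[:p] and string[p+1:] at each dot position p.
-- outside the precondition, e.g. on get_suffix_and_preffix(''): A returns '', B returns ''
import Mathlib
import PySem

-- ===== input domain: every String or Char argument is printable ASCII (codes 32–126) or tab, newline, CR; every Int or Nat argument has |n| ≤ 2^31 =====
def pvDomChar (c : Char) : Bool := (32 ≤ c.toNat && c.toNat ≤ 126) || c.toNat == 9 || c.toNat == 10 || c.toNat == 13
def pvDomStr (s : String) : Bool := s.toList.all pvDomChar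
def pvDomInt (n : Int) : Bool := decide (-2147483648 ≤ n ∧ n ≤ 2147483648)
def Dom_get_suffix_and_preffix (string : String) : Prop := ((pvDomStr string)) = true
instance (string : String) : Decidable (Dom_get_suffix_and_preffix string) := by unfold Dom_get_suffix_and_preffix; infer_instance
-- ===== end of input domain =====

-- B replaces A's split-into-tokens + '.'.join reconstruction by one enumerate pass over the
-- original string, slicing string[:p] / string[p+1:] at each dot position p (objective: simpler).

-- ===== PORT A =====
def get_suffix_and_preffix (string : String) : Option (List String) :=
  -- Python's `if not string: return string` returns the empty STRING (not a list) on "";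
  -- that input is excluded by Pre_ and the port returns none there.
  if string = "" then none
  else
    let children : List String := (PySem.Chars.splitOn string.toList ['.']).map String.ofList
    let children_len : Int := children.length
    some ((PySem.List.pyRange 1 children_len 1).foldl
      (fun results i =>
        (results ++ [PySem.Str.join "." (PySem.List.slice children (some 0) (some i))]) ++
        [PySem.Str.join "." (PySem.List.slice children (some i) (some children_len))]) [])

-- ===== PORT B =====
def get_suffix_and_preffix_alt (string : String) : Option (List String) :=
  if string = "" then none
  else
    some ((PySem.List.enumerate string.toList 0).foldl
      (fun results pc =>
        if pc.2 = '.' then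
          (results ++ [PySem.Str.slice string none (some pc.1)]) ++
          [PySem.Str.slice string (some (pc.1 + 1)) none]
        else results) [])

-- ===== PRECONDITION & SPEC =====
-- Pre_ excludes only the empty string, on which Python A returns the string "" itself — not a list,
-- so no value of the declared return type.
def Pre_get_suffix_and_preffix (string : String) : Prop := string ≠ ""
instance (string : String) : Decidable (Pre_get_suffix_and_preffix string) := by unfold Pre_get_suffix_and_preffix; infer_instance
def pvWitness_get_suffix_and_preffix : String := "a.b"
def Spec_get_suffix_and_preffix (string : String) (out : Option (List String)) : Prop := out = get_suffix_and_preffix_alt string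
instance (string : String) (out : Option (List String)) : Decidable (Spec_get_suffix_and_preffix string out) := by unfold Spec_get_suffix_and_preffix; infer_instance

-- ===== CLAIM (what is proved, stated in full; the proofs are below) =====
def Claim_equal_get_suffix_and_preffix : Prop := ∀ (string : String), Dom_get_suffix_and_preffix string → Pre_get_suffix_and_preffix string → Spec_get_suffix_and_preffix string (get_suffix_and_preffix string)

-- ===== LEMMAS AND PROOFS =====

/-- The (prefix-before-dot, suffix-after-dot) pair for every '.' of the string, in order. -/
def pairsCore : List Char → List (List Char × List Char)
  | [] => []
  | a :: cs =>
      (if a = '.' then [(([] : List Char), cs)] else []) ++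
      (pairsCore cs).map (fun q => (a :: q.1, q.2))

theorem splitOn_go_eq (c : Char) :
    ∀ (fuel : Nat) (l cur : List Char) (acc : List (List Char)), l.length < fuel →
      PySem.Chars.splitOn.go [c] fuel l cur acc
        = acc.reverse ++ (l.splitOn c).modifyHead (cur.reverse ++ ·) := by
  intro fuel
  induction fuel with
  | zero => intro l cur acc h; omega
  | succ n ih =>
    intro l cur acc h
    cases l with
    | nil =>
      simp [PySem.Chars.splitOn.go, List.splitOn, List.splitOnP, List.splitOnP.go]
    | cons a t =>
      rw [PySem.Chars.splitOn.go]
      by_cases hac : c = a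
      · subst hac
        have hp : List.isPrefixOf [c] (c :: t) = true := by simp [List.isPrefixOf]
        rw [if_pos hp]
        simp only [List.length_cons, List.drop_succ_cons, List.length_nil, List.drop_zero]
        rw [ih t [] (cur.reverse :: acc) (by simpa using Nat.lt_of_succ_lt_succ h)]
        simp [List.splitOn, List.splitOnP_cons]
        cases List.splitOnP (fun x => x == c) t <;> simp [List.modifyHead]
      · have hp : List.isPrefixOf [c] (a :: t) = false := by
          simp [List.isPrefixOf]
          exact fun hh => absurd hh hac
        rw [if_neg (by simp [hp])]
        rw [ih t (a :: cur) acc (by simpa using Nat.lt_of_succ_lt_succ h)]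
        have hsp : List.splitOn c (a :: t) = (List.splitOn c t).modifyHead (a :: ·) := by
          simp [List.splitOn, List.splitOnP_cons, beq_iff_eq]
          intro hh; exact absurd hh.symm hac
        rw [hsp]
        cases hct : List.splitOn c t with
        | nil => simp
        | cons x xs => simp

theorem pysem_splitOn_eq (cs : List Char) (c : Char) :
    PySem.Chars.splitOn cs [c] = cs.splitOn c := by
  rw [PySem.Chars.splitOn]
  rw [splitOn_go_eq c (cs.length + 1) cs [] [] (by omega)]
  cases cs.splitOn c <;> simp [List.modifyHead]

theorem B_gen {α : Type} (f : List Char → α) : ∀ (cs pre : List Char),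
    (PySem.List.enumerate cs (pre.length : Int)).flatMap
      (fun pc => if pc.2 = '.' then
          [f (List.take pc.1.toNat (pre ++ cs)), f (List.drop (pc.1 + 1).toNat (pre ++ cs))]
        else [])
    = (pairsCore cs).flatMap (fun q => [f (pre ++ q.1), f q.2]) := by
  intro cs
  induction cs with
  | nil => intro pre; simp [pairsCore, PySem.List.enumerate]
  | cons a t ih =>
    intro pre
    rw [PySem.List.enumerate_cons]
    have hcast : (pre.length : Int) + 1 = ((pre ++ [a]).length : Int) := by simp
    have hassoc : pre ++ a :: t = (pre ++ [a]) ++ t := by simp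
    rw [List.flatMap_cons]
    rw [hcast, hassoc, ih (pre ++ [a])]
    simp only [pairsCore, List.flatMap_append, List.flatMap_map]
    by_cases ha : a = '.'
    · subst ha
      simp [List.drop_append, List.drop_eq_nil_of_le]
    · simp [ha]

theorem B_nil {α : Type} (f : List Char → α) (cs : List Char) :
    (PySem.List.enumerate cs 0).flatMap
      (fun pc => if pc.2 = '.' then
          [f (List.take pc.1.toNat cs), f (List.drop (pc.1 + 1).toNat cs)]
        else [])
    = (pairsCore cs).flatMap (fun q => [f q.1, f q.2]) := by
  have := B_gen f cs []
  simpa using this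

theorem join_modify (a : Char) (h : List Char) (xs : List (List Char)) :
    PySem.Chars.join ['.'] ((a :: h) :: xs) = a :: PySem.Chars.join ['.'] (h :: xs) := by
  cases xs with
  | nil => simp [PySem.Chars.join_singleton]
  | cons x rest => rw [PySem.Chars.join_cons_cons, PySem.Chars.join_cons_cons]; simp

theorem splitOn_cons_char (a c : Char) (t : List Char) :
    List.splitOn c (a :: t) =
      if a = c then [] :: List.splitOn c t
      else (List.splitOn c t).modifyHead (a :: ·) := by
  simp [List.splitOn, List.splitOnP_cons]

theorem A_pairs : ∀ cs : List Char,
    (List.range ((cs.splitOn '.').length - 1)).map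
      (fun k => (PySem.Chars.join ['.'] ((cs.splitOn '.').take (k + 1)),
                 PySem.Chars.join ['.'] ((cs.splitOn '.').drop (k + 1))))
    = pairsCore cs := by
  intro cs
  induction cs with
  | nil => simp [pairsCore, List.splitOn, List.splitOnP, List.splitOnP.go]
  | cons a t ih =>
    obtain ⟨h, r, hhr⟩ : ∃ h r, List.splitOn '.' t = h :: r := by
      cases hh : List.splitOn '.' t with
      | nil => exact absurd hh (List.splitOnP_ne_nil _ _)
      | cons x xs => exact ⟨x, xs, rfl⟩
    have ihr := ih
    rw [hhr] at ihr
    simp only [List.length_cons, Nat.add_sub_cancel] at ihr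
    have hjoin : PySem.Chars.join ['.'] (h :: r) = t := by
      have := List.intercalate_splitOn t '.'
      rw [hhr] at this
      exact this
    by_cases ha : a = '.'
    · subst ha
      rw [splitOn_cons_char, if_pos rfl, hhr]
      simp only [List.length_cons, Nat.add_sub_cancel, List.range_succ_eq_map,
        List.map_cons, List.map_map]
      have hhead : (PySem.Chars.join ['.'] (List.take (0 + 1) ([] :: h :: r)),
          PySem.Chars.join ['.'] (List.drop (0 + 1) ([] :: h :: r))) = (([] : List Char), t) := by
        simp [PySem.Chars.join_singleton, hjoin]
      rw [hhead]
      have htail : List.map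
        ((fun k =>
            (PySem.Chars.join ['.'] (List.take (k + 1) ([] :: h :: r)),
              PySem.Chars.join ['.'] (List.drop (k + 1) ([] :: h :: r)))) ∘
          Nat.succ)
        (List.range r.length)
        = List.map ((fun q => (('.' : Char) :: q.1, q.2)) ∘ (fun k =>
            (PySem.Chars.join ['.'] (List.take (k + 1) (h :: r)),
              PySem.Chars.join ['.'] (List.drop (k + 1) (h :: r)))))
        (List.range r.length) := by
        apply List.map_congr_left
        intro k hk
        simp only [Function.comp_apply, Nat.succ_eq_add_one, List.take_succ_cons,
          List.drop_succ_cons, PySem.Chars.join_cons_cons]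
        simp
      rw [htail, ← List.map_map, ihr]
      simp [pairsCore]
    · rw [splitOn_cons_char, if_neg ha, hhr]
      simp only [List.modifyHead, List.length_cons, Nat.add_sub_cancel]
      have htail : List.map
        (fun k =>
            (PySem.Chars.join ['.'] (List.take (k + 1) ((a :: h) :: r)),
              PySem.Chars.join ['.'] (List.drop (k + 1) ((a :: h) :: r))))
        (List.range r.length)
        = List.map ((fun q => (a :: q.1, q.2)) ∘ (fun k =>
            (PySem.Chars.join ['.'] (List.take (k + 1) (h :: r)),
              PySem.Chars.join ['.'] (List.drop (k + 1) (h :: r)))))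
        (List.range r.length) := by
        apply List.map_congr_left
        intro k hk
        simp only [Function.comp_apply, List.take_succ_cons, List.drop_succ_cons, join_modify]
      rw [htail, ← List.map_map, ihr]
      simp [pairsCore, ha]

theorem join_map_ofList (l : List (List Char)) :
    PySem.Str.join "." (l.map String.ofList) = String.ofList (PySem.Chars.join ['.'] l) := by
  simp [PySem.Str.join, List.map_map, Function.comp_def, String.toList_ofList]

theorem A_eq (s : String) (hs : s ≠ "") :
    get_suffix_and_preffix s
      = some ((pairsCore s.toList).flatMap
          (fun q => [String.ofList q.1, String.ofList q.2])) := by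
  unfold get_suffix_and_preffix
  rw [if_neg hs]
  simp only [pysem_splitOn_eq]
  congr 1
  rw [PySem.List.foldl_congr_mem _ _
    (fun results i => results ++
      [PySem.Str.join "." (PySem.List.slice ((s.toList.splitOn '.').map String.ofList) (some 0) (some i)),
       PySem.Str.join "." (PySem.List.slice ((s.toList.splitOn '.').map String.ofList) (some i)
         (some (((s.toList.splitOn '.').map String.ofList).length : Int)))])
    _ (by intro acc x hx; simp)]
  rw [PySem.List.foldl_append_eq_flatMap]
  rw [List.nil_append]
  rw [PySem.List.pyRange_one]
  rw [List.flatMap_map]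
  have hlen : ((((s.toList.splitOn '.').map String.ofList).length : Int) - 1).toNat
      = (s.toList.splitOn '.').length - 1 := by
    simp only [List.length_map]
    omega
  rw [hlen]
  rw [List.flatMap_congr (g := fun k => [String.ofList (PySem.Chars.join ['.'] ((s.toList.splitOn '.').take (k + 1))),
       String.ofList (PySem.Chars.join ['.'] ((s.toList.splitOn '.').drop (k + 1)))])
    (by
      intro k hk
      rw [List.mem_range] at hk
      have h1 : (0 : Int) ≤ 1 + (k : Int) := by omega
      have ht1 : ((1 : Int) + (k : Int)).toNat = k + 1 := by omega
      rw [PySem.List.slice_zero_start, PySem.List.slice_to _ h1,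
        PySem.List.slice_toNat _ h1 (by positivity)]
      rw [ht1, Int.toNat_natCast]
      rw [← List.map_take, ← List.map_drop, ← List.map_take]
      rw [List.take_of_length_le (l := List.drop (k + 1) (List.splitOn '.' s.toList)) (by simp)]
      rw [join_map_ofList, join_map_ofList])]
  rw [← A_pairs s.toList]
  rw [List.flatMap_map]

theorem B_eq (s : String) (hs : s ≠ "") :
    get_suffix_and_preffix_alt s
      = some ((pairsCore s.toList).flatMap
          (fun q => [String.ofList q.1, String.ofList q.2])) := by
  unfold get_suffix_and_preffix_alt
  rw [if_neg hs]
  congr 1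
  rw [PySem.List.foldl_congr_mem _ _
    (fun results pc => results ++ (if pc.2 = '.' then
      [PySem.Str.slice s none (some pc.1), PySem.Str.slice s (some (pc.1 + 1)) none] else []))
    _ (by intro acc x hx; by_cases hx2 : x.2 = '.' <;> simp [hx2])]
  rw [PySem.List.foldl_append_eq_flatMap]
  rw [List.nil_append]
  rw [List.flatMap_congr (g := fun pc => if pc.2 = '.' then
      [String.ofList (List.take pc.1.toNat s.toList),
       String.ofList (List.drop (pc.1 + 1).toNat s.toList)] else [])
    (by
      intro pc hpc
      rw [PySem.List.mem_enumerate_iff] at hpc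
      obtain ⟨k, hk, rfl⟩ := hpc
      have h0 : (0 : Int) ≤ 0 + (k : Int) := by omega
      by_cases hx2 : (s.toList[k] : Char) = '.'
      · simp only [hx2]
        rw [PySem.Str.slice, PySem.Str.slice]
        rw [PySem.Chars.slice_eq_listSlice, PySem.Chars.slice_eq_listSlice]
        rw [PySem.List.slice_to _ h0, PySem.List.slice_from _ (by omega)]
      · simp [hx2])]
  exact B_nil String.ofList s.toList

-- ===== VERDICT (by name: the statement is the Claim_ definition above) =====
theorem get_suffix_and_preffix_spec : Claim_equal_get_suffix_and_preffix := by
  unfold Claim_equal_get_suffix_and_preffix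
  intro s _ hpre
  unfold Spec_get_suffix_and_preffix
  rw [A_eq s hpre, B_eq s hpre]
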